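-- pv_equiv track=rewrite | github.com/RTXteam/RTX | code/reasoningtool/Q2Solution.py | get_proteins_in_both
-- ===== SOURCE A (Python) =====
-- def get_proteins_in_both(paths, pathway_indicies, anat_indicies):
-- 	found_path_names = set()
-- 	for index in pathway_indicies:
-- 		path = paths[index]
-- 		for node in path:
-- 			if node[1] == 'reactome_pathway':
-- 				found_path_names.add(node[0])
-- 	# Get the names of the found anatomy entities
-- 	found_anat_names = set()
-- 	for index in anat_indicies:
-- 		path = paths[index]
-- 		for node in path:
-- 			if node[1] == 'anatont_anatomy':
-- 				found_anat_names.add(node[0])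
-- 	# get the proteins in the pathway and anat paths
-- 	proteins_in_pathway = set()
-- 	for index in pathway_indicies:
-- 		path = paths[index]
-- 		for node in path:
-- 			if node[1] == "uniprot_protein":
-- 				proteins_in_pathway.add(node[0])
-- 	proteins_in_anat = set()
-- 	for index in anat_indicies:
-- 		path = paths[index]
-- 		for node in path:
-- 			if node[1] == "uniprot_protein":
-- 				proteins_in_anat.add(node[0])
-- 	in_both = proteins_in_pathway.intersection(proteins_in_anat)
-- 	return in_both, found_anat_names
-- ===== SOURCE B (Python) =====
-- def get_proteins_in_both(paths, pathway_indicies, anat_indicies):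
--     # Mark-and-sweep: one dict of flags replaces A's two protein sets and the
--     # set intersection; anat-only proteins are never stored at all.
--     flags = {}
--     for index in pathway_indicies:
--         for name, kind in paths[index]:
--             if kind == 'uniprot_protein':
--                 flags[name] = False
--     found_anat_names = set()
--     for index in anat_indicies:
--         for name, kind in paths[index]:
--             if kind == 'uniprot_protein':
--                 if name in flags:
--                     flags[name] = True
--             elif kind == 'anatont_anatomy':
--                 found_anat_names.add(name)
--     return {name for name, ok in flags.items() if ok}, found_anat_names
-- ===== Notes on version B (the rewrite author's own statement) =====
-- stated objective: alternative
-- what changed: B replaces A's two protein sets and set intersection (plus a dead found_path_names pass) by a single mark-and-sweep dict: pathway proteins are inserted unmarked, the anat scan marks those it re-encounters and collects anat names, and the marked keys are the answer.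
import Mathlib
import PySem

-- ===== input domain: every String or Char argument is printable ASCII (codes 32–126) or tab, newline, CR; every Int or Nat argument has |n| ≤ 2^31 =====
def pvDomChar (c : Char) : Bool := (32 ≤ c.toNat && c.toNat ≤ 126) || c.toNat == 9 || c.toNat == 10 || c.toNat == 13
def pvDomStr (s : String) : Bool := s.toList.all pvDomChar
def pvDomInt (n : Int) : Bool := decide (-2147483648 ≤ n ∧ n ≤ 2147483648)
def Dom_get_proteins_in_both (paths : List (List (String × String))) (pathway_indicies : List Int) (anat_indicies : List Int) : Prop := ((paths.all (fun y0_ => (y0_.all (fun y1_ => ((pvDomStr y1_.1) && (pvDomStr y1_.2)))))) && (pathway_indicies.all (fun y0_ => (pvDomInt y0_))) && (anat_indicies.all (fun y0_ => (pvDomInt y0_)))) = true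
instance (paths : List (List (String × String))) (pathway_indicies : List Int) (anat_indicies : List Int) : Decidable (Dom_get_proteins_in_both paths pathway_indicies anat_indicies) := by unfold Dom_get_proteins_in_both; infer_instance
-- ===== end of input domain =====

-- B replaces A's two protein sets and set intersection by a single mark-and-sweep dict of
-- flags (pathway proteins marked, then confirmed during the anat scan); simpler decomposition.
-- ===== PORT A =====
-- literal transliteration; paths[index] is pyGetD, exact under Pre_ (all indices in range)
def get_proteins_in_both (paths : List (List (String × String))) (pathway_indicies : List Int) (anat_indicies : List Int) : List String × List String :=
  let _found_path_names : PySem.Set String :=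
    pathway_indicies.foldl (fun s index =>
      (PySem.List.pyGetD paths index []).foldl
        (fun s node => if node.2 == "reactome_pathway" then PySem.Set.add s node.1 else s) s)
      PySem.Set.empty
  let found_anat_names : PySem.Set String :=
    anat_indicies.foldl (fun s index =>
      (PySem.List.pyGetD paths index []).foldl
        (fun s node => if node.2 == "anatont_anatomy" then PySem.Set.add s node.1 else s) s)
      PySem.Set.empty
  let proteins_in_pathway : PySem.Set String :=
    pathway_indicies.foldl (fun s index =>
      (PySem.List.pyGetD paths index []).foldl
        (fun s node => if node.2 == "uniprot_protein" then PySem.Set.add s node.1 else s) s)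
      PySem.Set.empty
  let proteins_in_anat : PySem.Set String :=
    anat_indicies.foldl (fun s index =>
      (PySem.List.pyGetD paths index []).foldl
        (fun s node => if node.2 == "uniprot_protein" then PySem.Set.add s node.1 else s) s)
      PySem.Set.empty
  let in_both := PySem.Set.inter proteins_in_pathway proteins_in_anat
  (in_both, found_anat_names)

-- ===== PORT B =====
-- body of Source B's second loop: confirm a pathway protein, or record an anat name
def pvMarkStep (st : PySem.Dict String Bool × PySem.Set String) (node : String × String) : PySem.Dict String Bool × PySem.Set String :=
  if node.2 == "uniprot_protein" then
    (if st.1.contains node.1 then st.1.insert node.1 true else st.1, st.2)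
  else if node.2 == "anatont_anatomy" then (st.1, PySem.Set.add st.2 node.1)
  else st

def get_proteins_in_both_alt (paths : List (List (String × String))) (pathway_indicies : List Int) (anat_indicies : List Int) : List String × List String :=
  let flags : PySem.Dict String Bool :=
    pathway_indicies.foldl (fun d index =>
      (PySem.List.pyGetD paths index []).foldl
        (fun d node => if node.2 == "uniprot_protein" then d.insert node.1 false else d) d)
      PySem.Dict.empty
  let st :=
    anat_indicies.foldl (fun st index =>
      (PySem.List.pyGetD paths index []).foldl pvMarkStep st)
      (flags, PySem.Set.empty)
  (PySem.Set.ofList ((st.1.items.filter (fun p => p.2)).map Prod.fst), st.2)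

-- ===== PRECONDITION & SPEC =====
-- Pre_ excludes exactly the inputs where A raises IndexError: an index out of range of paths.
def Pre_get_proteins_in_both (paths : List (List (String × String))) (pathway_indicies : List Int) (anat_indicies : List Int) : Prop :=
  (∀ i ∈ pathway_indicies, PySem.Raise.InRange paths.length i) ∧
  (∀ i ∈ anat_indicies, PySem.Raise.InRange paths.length i)
instance (paths : List (List (String × String))) (pathway_indicies : List Int) (anat_indicies : List Int) : Decidable (Pre_get_proteins_in_both paths pathway_indicies anat_indicies) := by unfold Pre_get_proteins_in_both; infer_instance

def pvWitness_get_proteins_in_both : (List (List (String × String))) × List Int × List Int :=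
  ([[("P1", "uniprot_protein"), ("A", "anatont_anatomy")], [("P1", "uniprot_protein")]], [0], [1, 0])

def Spec_get_proteins_in_both (paths : List (List (String × String))) (pathway_indicies : List Int) (anat_indicies : List Int) (out : List String × List String) : Prop := out = get_proteins_in_both_alt paths pathway_indicies anat_indicies
instance (paths : List (List (String × String))) (pathway_indicies : List Int) (anat_indicies : List Int) (out : List String × List String) : Decidable (Spec_get_proteins_in_both paths pathway_indicies anat_indicies out) := by unfold Spec_get_proteins_in_both; infer_instance

-- ===== CLAIM =====
def Claim_equal_get_proteins_in_both : Prop := ∀ (paths : List (List (String × String))) (pathway_indicies : List Int) (anat_indicies : List Int), Dom_get_proteins_in_both paths pathway_indicies anat_indicies → Pre_get_proteins_in_both paths pathway_indicies anat_indicies → Spec_get_proteins_in_both paths pathway_indicies anat_indicies (get_proteins_in_both paths pathway_indicies anat_indicies)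

-- ===== LEMMAS AND PROOFS =====

-- abbreviations used only by the proofs
def pvUpStep (s : PySem.Set String) (node : String × String) : PySem.Set String :=
  if node.2 == "uniprot_protein" then PySem.Set.add s node.1 else s

def pvUpFold (paths : List (List (String × String))) (l : List Int) (s : PySem.Set String) : PySem.Set String :=
  l.foldl (fun s index => (PySem.List.pyGetD paths index []).foldl pvUpStep s) s

-- contains on a Set.add, Bool level
theorem pv_contains_add (Q : PySem.Set String) (x n : String) :
    PySem.Set.contains (PySem.Set.add Q x) n = (n == x || PySem.Set.contains Q n) := by
  by_cases hx : x ∈ Q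
  · rw [PySem.Set.add_of_mem hx]
    by_cases hnx : n = x
    · simp [PySem.Set.contains, hnx, hx]
    · simp [hnx]
  · rw [PySem.Set.add_of_not_mem hx]
    by_cases hnx : n = x
    · simp [PySem.Set.contains, hnx]
    · simp [PySem.Set.contains, hnx]

-- contains of a dict whose items are P paired with any value function is membership in P
theorem pv_contains_mk_map (P : List String) (f : String → Bool) (x : String) :
    (PySem.Dict.mk (P.map (fun n => (n, f n)))).contains x = PySem.Set.contains P x := by
  simp [PySem.Dict.contains, PySem.Set.contains, List.any_eq]

-- inserting (x, false) into the all-false flags dict is exactly Set.add on its key list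
theorem pv_insert_false (S : List String) (x : String) :
    (PySem.Dict.mk (S.map (fun n => (n, false)))).insert x false
      = PySem.Dict.mk ((PySem.Set.add S x).map (fun n => (n, false))) := by
  by_cases hx : x ∈ S
  · have hc : (PySem.Dict.mk (S.map (fun n => (n, false)))).contains x = true := by
      rw [pv_contains_mk_map]; simp [PySem.Set.contains, hx]
    rw [PySem.Set.add_of_mem hx]
    simp only [PySem.Dict.insert, hc, if_true]
    congr 1
    rw [List.map_map]
    apply List.map_congr_left
    intro n _
    by_cases hnx : n = x
    · subst hnx; simp
    · simp [Function.comp, hnx]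
  · have hc : (PySem.Dict.mk (S.map (fun n => (n, false)))).contains x = false := by
      rw [pv_contains_mk_map]; simp [PySem.Set.contains, hx]
    rw [PySem.Set.add_of_not_mem hx]
    simp only [PySem.Dict.insert, hc, Bool.false_eq_true, if_false]
    simp

-- pass 1 (inner): one path's worth of flag insertions tracks A's protein-set fold
theorem pv_pass1_inner (path : List (String × String)) (S : List String) :
    path.foldl (fun d node => if node.2 == "uniprot_protein" then d.insert node.1 false else d)
        (PySem.Dict.mk (S.map (fun n => (n, false))))
      = PySem.Dict.mk ((path.foldl pvUpStep S).map (fun n => (n, false))) := by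
  induction path generalizing S with
  | nil => rfl
  | cons node rest ih =>
      simp only [List.foldl_cons, pvUpStep]
      by_cases h : node.2 == "uniprot_protein"
      · rw [if_pos h, if_pos h, pv_insert_false, ih]
      · rw [if_neg h, if_neg h, ih]

-- pass 1 (outer)
theorem pv_pass1_outer (paths : List (List (String × String))) (l : List Int) (S : List String) :
    l.foldl (fun d index =>
        (PySem.List.pyGetD paths index []).foldl
          (fun d node => if node.2 == "uniprot_protein" then d.insert node.1 false else d) d)
        (PySem.Dict.mk (S.map (fun n => (n, false))))
      = PySem.Dict.mk ((pvUpFold paths l S).map (fun n => (n, false))) := by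
  induction l generalizing S with
  | nil => rfl
  | cons i rest ih =>
      simp only [List.foldl_cons, pvUpFold] at *
      rw [pv_pass1_inner, ih]

-- one marking step on the invariant dict shape advances the tracked set by Set.add
theorem pv_mark_step (P : List String) (Q : PySem.Set String) (x : String) :
    (if (PySem.Dict.mk (P.map (fun n => (n, PySem.Set.contains Q n)))).contains x
      then (PySem.Dict.mk (P.map (fun n => (n, PySem.Set.contains Q n)))).insert x true
      else PySem.Dict.mk (P.map (fun n => (n, PySem.Set.contains Q n))))
      = PySem.Dict.mk (P.map (fun n => (n, PySem.Set.contains (PySem.Set.add Q x) n))) := by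
  by_cases hx : x ∈ P
  · have hc : (PySem.Dict.mk (P.map (fun n => (n, PySem.Set.contains Q n)))).contains x = true := by
      rw [pv_contains_mk_map]; simp [PySem.Set.contains, hx]
    simp only [hc, if_true, PySem.Dict.insert]
    congr 1
    rw [List.map_map]
    apply List.map_congr_left
    intro n _
    by_cases hnx : n = x
    · subst hnx; simp
    · have hb : (n == x) = false := by simp [hnx]
      simp only [Function.comp_apply, hb, Bool.false_eq_true, if_false, pv_contains_add,
        Bool.false_or]
  · have hc : (PySem.Dict.mk (P.map (fun n => (n, PySem.Set.contains Q n)))).contains x = false := by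
      rw [pv_contains_mk_map]; simp [PySem.Set.contains, hx]
    simp only [hc, Bool.false_eq_true, if_false]
    congr 1
    apply List.map_congr_left
    intro n hn
    have hnx : n ≠ x := fun h => hx (h ▸ hn)
    have hb : (n == x) = false := by simp [hnx]
    simp only [pv_contains_add, hb, Bool.false_or]

-- the fused second loop splits: flags follow A's anat-protein fold, names follow A's anat-name fold (inner)
theorem pv_mark_inner (path : List (String × String)) (P : List String) (Q R : PySem.Set String) :
    path.foldl pvMarkStep (PySem.Dict.mk (P.map (fun n => (n, PySem.Set.contains Q n))), R)
      = (PySem.Dict.mk (P.map (fun n => (n, PySem.Set.contains (path.foldl pvUpStep Q) n))),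
         path.foldl (fun s node => if node.2 == "anatont_anatomy" then PySem.Set.add s node.1 else s) R) := by
  induction path generalizing Q R with
  | nil => rfl
  | cons node rest ih =>
      by_cases h1 : (node.2 == "uniprot_protein") = true
      · have h2 : (node.2 == "anatont_anatomy") = false := by
          simp only [beq_iff_eq] at h1 ⊢; simp [h1]
        simp only [List.foldl_cons, pvMarkStep, pvUpStep, h1, h2, Bool.false_eq_true,
          if_true, if_false]
        rw [pv_mark_step, ih]
      · have h1' : (node.2 == "uniprot_protein") = false := by
          cases h : (node.2 == "uniprot_protein") <;> simp_all
        by_cases h2 : (node.2 == "anatont_anatomy") = true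
        · simp only [List.foldl_cons, pvMarkStep, pvUpStep, h1', h2, Bool.false_eq_true,
            if_true, if_false]
          rw [ih]
        · have h2' : (node.2 == "anatont_anatomy") = false := by
            cases h : (node.2 == "anatont_anatomy") <;> simp_all
          simp only [List.foldl_cons, pvMarkStep, pvUpStep, h1', h2', Bool.false_eq_true, if_false]
          rw [ih]

-- the fused second loop splits (outer)
theorem pv_mark_outer (paths : List (List (String × String))) (l : List Int) (P : List String) (Q R : PySem.Set String) :
    l.foldl (fun st index => (PySem.List.pyGetD paths index []).foldl pvMarkStep st)
        (PySem.Dict.mk (P.map (fun n => (n, PySem.Set.contains Q n))), R)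
      = (PySem.Dict.mk (P.map (fun n => (n, PySem.Set.contains (pvUpFold paths l Q) n))),
         l.foldl (fun s index =>
           (PySem.List.pyGetD paths index []).foldl
             (fun s node => if node.2 == "anatont_anatomy" then PySem.Set.add s node.1 else s) s) R) := by
  induction l generalizing Q R with
  | nil => rfl
  | cons i rest ih =>
      simp only [List.foldl_cons, pvUpFold] at *
      rw [pv_mark_inner, ih]

-- A's protein folds keep their set Nodup
theorem pv_nodup_up_inner (path : List (String × String)) (s : PySem.Set String) (h : s.Nodup) :
    (path.foldl pvUpStep s).Nodup := by
  induction path generalizing s with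
  | nil => exact h
  | cons node rest ih =>
      simp only [List.foldl_cons, pvUpStep]
      by_cases hn : node.2 == "uniprot_protein"
      · rw [if_pos hn]; exact ih _ (PySem.Set.nodup_add _ _ h)
      · rw [if_neg hn]; exact ih _ h

theorem pv_nodup_up (paths : List (List (String × String))) (l : List Int) (s : PySem.Set String) (h : s.Nodup) :
    (pvUpFold paths l s).Nodup := by
  induction l generalizing s with
  | nil => exact h
  | cons i rest ih =>
      simp only [pvUpFold, List.foldl_cons] at *
      exact ih _ (pv_nodup_up_inner _ _ h)

-- filtering the flagged items of the invariant dict is exactly Set.inter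
theorem pv_filter_items (P : List String) (Q : PySem.Set String) :
    ((PySem.Dict.mk (P.map (fun n => (n, PySem.Set.contains Q n)))).items.filter
        (fun p => p.2)).map Prod.fst
      = PySem.Set.inter P Q := by
  induction P with
  | nil => rfl
  | cons n rest ih =>
      by_cases h : n ∈ Q
      · have hb : PySem.Set.contains Q n = true := by simp [PySem.Set.contains, h]
        simp only [List.map_cons, List.filter_cons, PySem.Set.inter,
          PySem.Set.contains] at *
        simp only [hb, if_true, List.map_cons, ih]
      · have hb : PySem.Set.contains Q n = false := by simp [PySem.Set.contains, h]
        simp only [List.map_cons, List.filter_cons, PySem.Set.inter,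
          PySem.Set.contains] at *
        simp only [hb, Bool.false_eq_true, if_false, ih]

-- ===== VERDICT =====
theorem get_proteins_in_both_spec : Claim_equal_get_proteins_in_both := by
  intro paths pw an _ _
  show _ = _
  have hnd : (pvUpFold paths pw PySem.Set.empty).Nodup :=
    pv_nodup_up paths pw PySem.Set.empty List.nodup_nil
  have hint : (PySem.Set.inter (pvUpFold paths pw PySem.Set.empty)
      (pvUpFold paths an PySem.Set.empty)).Nodup := List.Nodup.filter _ hnd
  have h_a : get_proteins_in_both paths pw an
      = (PySem.Set.inter (pvUpFold paths pw PySem.Set.empty) (pvUpFold paths an PySem.Set.empty),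
         an.foldl (fun s index =>
           (PySem.List.pyGetD paths index []).foldl
             (fun s node => if node.2 == "anatont_anatomy" then PySem.Set.add s node.1 else s) s)
           PySem.Set.empty) := rfl
  have h_alt : get_proteins_in_both_alt paths pw an
      = (PySem.Set.ofList (PySem.Set.inter (pvUpFold paths pw PySem.Set.empty)
           (pvUpFold paths an PySem.Set.empty)),
         an.foldl (fun s index =>
           (PySem.List.pyGetD paths index []).foldl
             (fun s node => if node.2 == "anatont_anatomy" then PySem.Set.add s node.1 else s) s)
           PySem.Set.empty) := by
    unfold get_proteins_in_both_alt
    have hempty : (PySem.Dict.empty : PySem.Dict String Bool)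
        = PySem.Dict.mk (([] : List String).map (fun n => (n, false))) := rfl
    dsimp only
    rw [hempty, pv_pass1_outer]
    have hfalse : ((pvUpFold paths pw []).map (fun n => (n, false)))
        = ((pvUpFold paths pw []).map
            (fun n => (n, PySem.Set.contains (PySem.Set.empty : PySem.Set String) n))) := by
      apply List.map_congr_left; intro n _; rfl
    rw [hfalse, pv_mark_outer]
    dsimp only
    rw [pv_filter_items]
    rfl
  rw [h_a, h_alt]
  exact Prod.ext (PySem.Set.ofList_eq_self_of_nodup _ hint).symm rfl
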